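-- pv_equiv track=rewrite | github.com/sainivaibhav742/ai-resume-screener | ml/skill_recommender.py | _prioritize_next_skills
-- ===== SOURCE A (Python) =====
-- from typing import Dict, List, Set, Tuple
--
-- def _prioritize_next_skills(
--
--     current_skills: List[str],
--     complementary: List[str],
--     career_recs: Dict,
--     trending: List[str]
-- ) -> List[Dict]:
--     """Prioritize which skills to learn next"""
--     priority_skills = []
--     current_lower = [s.lower() for s in current_skills]
--
--     # Priority 1: Missing core skills for current role
--     for skill in career_recs.get("missing_core_skills", []):
--         if skill.lower() not in current_lower:
--             priority_skills.append({
--                 "skill": skill,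
--                 "priority": "critical",
--                 "reason": "Required for current role",
--                 "category": "career_essential"
--             })
--
--     # Priority 2: Missing recommended skills for next level
--     for skill in career_recs.get("missing_recommended_skills", [])[:5]:
--         if skill.lower() not in current_lower:
--             priority_skills.append({
--                 "skill": skill,
--                 "priority": "high",
--                 "reason": "Needed for career advancement",
--                 "category": "career_growth"
--             })
--
--     # Priority 3: Trending skills that complement current stack
--     for skill in trending[:5]:
--         if skill.lower() not in current_lower and skill not in [s["skill"] for s in priority_skills]:
--             priority_skills.append({
--                 "skill": skill,
--                 "priority": "medium",
--                 "reason": "High market demand",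
--                 "category": "market_trend"
--             })
--
--     # Priority 4: Complementary skills
--     for skill in complementary[:5]:
--         if skill.lower() not in current_lower and skill not in [s["skill"] for s in priority_skills]:
--             priority_skills.append({
--                 "skill": skill,
--                 "priority": "medium",
--                 "reason": "Complements your current skills",
--                 "category": "complementary"
--             })
--
--     return priority_skills
-- ===== SOURCE B (Python) =====
-- def _first_new(src, cl, seen):
--     """Recursively keep skills whose lowercase is not in cl and that are not in seen,
--     first occurrence wins."""
--     if not src:
--         return []
--     s, rest = src[0], src[1:]
--     if s.lower() not in cl and s not in seen:
--         return [s] + _first_new(rest, cl, seen | {s})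
--     return _first_new(rest, cl, seen)
--
--
-- def _tag(skills, priority, reason, category):
--     return [{"skill": s, "priority": priority, "reason": reason, "category": category}
--             for s in skills]
--
--
-- def _prioritize_next_skills(current_skills, complementary, career_recs, trending):
--     """Prioritize which skills to learn next: select the four name lists first,
--     then label them and concatenate."""
--     cl = {s.lower() for s in current_skills}
--     core = [s for s in career_recs.get("missing_core_skills", []) if s.lower() not in cl]
--     rec = [s for s in career_recs.get("missing_recommended_skills", [])[:5] if s.lower() not in cl]
--     seen = set(core) | set(rec)
--     trend = _first_new(trending[:5], cl, seen)
--     comp = _first_new(complementary[:5], cl, seen | set(trend))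
--     return (_tag(core, "critical", "Required for current role", "career_essential")
--             + _tag(rec, "high", "Needed for career advancement", "career_growth")
--             + _tag(trend, "medium", "High market demand", "market_trend")
--             + _tag(comp, "medium", "Complements your current skills", "complementary"))
-- ===== Notes on version B (the rewrite author's own statement) =====
-- stated objective: alternative
-- what changed: B separates selection from labelling: it first computes the four plain skill-name lists (filters for the un-deduped phases, a recursive first-occurrence selector seeded with the earlier names for the deduped ones), then builds the dicts in one final map and concatenates, whereas A grows a single dict list and rescans it per candidate.
import Mathlib
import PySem

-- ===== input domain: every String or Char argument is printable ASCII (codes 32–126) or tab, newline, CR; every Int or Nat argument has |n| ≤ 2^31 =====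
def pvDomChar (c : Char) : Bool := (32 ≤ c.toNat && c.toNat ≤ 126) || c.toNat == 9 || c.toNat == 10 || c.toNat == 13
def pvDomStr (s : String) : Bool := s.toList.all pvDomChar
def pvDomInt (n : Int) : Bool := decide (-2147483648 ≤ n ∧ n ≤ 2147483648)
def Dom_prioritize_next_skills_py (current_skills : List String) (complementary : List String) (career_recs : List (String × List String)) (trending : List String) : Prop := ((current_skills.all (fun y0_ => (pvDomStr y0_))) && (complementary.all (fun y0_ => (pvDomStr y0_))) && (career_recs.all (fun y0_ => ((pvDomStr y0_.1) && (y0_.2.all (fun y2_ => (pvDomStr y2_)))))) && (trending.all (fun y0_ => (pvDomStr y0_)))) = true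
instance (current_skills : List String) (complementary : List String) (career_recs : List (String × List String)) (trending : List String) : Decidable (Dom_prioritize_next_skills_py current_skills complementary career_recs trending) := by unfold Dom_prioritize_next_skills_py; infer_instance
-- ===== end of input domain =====

-- B selects the four plain skill-name lists first (filters; a recursive first-occurrence
-- selector for the deduped phases) and labels them in one final map, instead of A's growth
-- of a dict list with per-candidate rescans; alternative decomposition, same results.

-- ===== PORT A =====
-- literal transliteration of A: four sequential loops appending labelled dicts;
-- loops 3 and 4 recompute [s["skill"] for s in priority_skills] on each step.
def prioritize_next_skills_py (current_skills : List String) (complementary : List String) (career_recs : List (String × List String)) (trending : List String) : List (List (String × String)) :=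
  let current_lower := current_skills.map PySem.Str.lower
  let ps1 := ((PySem.Dict.mk career_recs).getD "missing_core_skills" []).foldl (fun acc skill =>
      if !(current_lower.contains (PySem.Str.lower skill)) then
        acc ++ [[("skill", skill), ("priority", "critical"), ("reason", "Required for current role"), ("category", "career_essential")]]
      else acc) []
  let ps2 := (PySem.List.slice ((PySem.Dict.mk career_recs).getD "missing_recommended_skills" []) none (some 5)).foldl (fun acc skill =>
      if !(current_lower.contains (PySem.Str.lower skill)) then
        acc ++ [[("skill", skill), ("priority", "high"), ("reason", "Needed for career advancement"), ("category", "career_growth")]]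
      else acc) ps1
  let ps3 := (PySem.List.slice trending none (some 5)).foldl (fun acc skill =>
      if !(current_lower.contains (PySem.Str.lower skill)) && !((acc.map (fun s => (PySem.Dict.mk s).getD "skill" "")).contains skill) then
        acc ++ [[("skill", skill), ("priority", "medium"), ("reason", "High market demand"), ("category", "market_trend")]]
      else acc) ps2
  let ps4 := (PySem.List.slice complementary none (some 5)).foldl (fun acc skill =>
      if !(current_lower.contains (PySem.Str.lower skill)) && !((acc.map (fun s => (PySem.Dict.mk s).getD "skill" "")).contains skill) then
        acc ++ [[("skill", skill), ("priority", "medium"), ("reason", "Complements your current skills"), ("category", "complementary")]]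
      else acc) ps3
  ps4

-- ===== PORT B =====
-- Source B's recursive first-occurrence selector _first_new(src, cl, seen)
def pnsFirstNew (src : List String) (cl : PySem.Set String) (seen : PySem.Set String) : List String :=
  match src with
  | [] => []
  | s :: rest =>
    if !(PySem.Set.contains cl (PySem.Str.lower s)) && !(PySem.Set.contains seen s) then
      [s] ++ pnsFirstNew rest cl (PySem.Set.add seen s)
    else pnsFirstNew rest cl seen

-- Source B's _tag: label a name list with fixed priority/reason/category
def pnsTag (skills : List String) (priority reason category : String) : List (List (String × String)) :=
  skills.map (fun s => [("skill", s), ("priority", priority), ("reason", reason), ("category", category)])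

-- literal transliteration of Source B: select the four name lists, then label and concatenate.
def prioritize_next_skills_py_alt (current_skills : List String) (complementary : List String) (career_recs : List (String × List String)) (trending : List String) : List (List (String × String)) :=
  let cl := PySem.Set.ofList (current_skills.map PySem.Str.lower)
  let core := ((PySem.Dict.mk career_recs).getD "missing_core_skills" []).filter
      (fun s => !(PySem.Set.contains cl (PySem.Str.lower s)))
  let rec_ := (PySem.List.slice ((PySem.Dict.mk career_recs).getD "missing_recommended_skills" []) none (some 5)).filter
      (fun s => !(PySem.Set.contains cl (PySem.Str.lower s)))
  let seen := PySem.Set.ofList (core ++ rec_)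
  let trend := pnsFirstNew (PySem.List.slice trending none (some 5)) cl seen
  let comp := pnsFirstNew (PySem.List.slice complementary none (some 5)) cl (PySem.Set.ofList (core ++ rec_ ++ trend))
  pnsTag core "critical" "Required for current role" "career_essential"
    ++ pnsTag rec_ "high" "Needed for career advancement" "career_growth"
    ++ pnsTag trend "medium" "High market demand" "market_trend"
    ++ pnsTag comp "medium" "Complements your current skills" "complementary"

-- ===== PRECONDITION & SPEC =====
def Spec_prioritize_next_skills_py (current_skills : List String) (complementary : List String) (career_recs : List (String × List String)) (trending : List String) (out : List (List (String × String))) : Prop := out = prioritize_next_skills_py_alt current_skills complementary career_recs trending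
instance (current_skills : List String) (complementary : List String) (career_recs : List (String × List String)) (trending : List String) (out : List (List (String × String))) : Decidable (Spec_prioritize_next_skills_py current_skills complementary career_recs trending out) := by unfold Spec_prioritize_next_skills_py; infer_instance

-- ===== CLAIM (what is proved, stated in full; the proofs are below) =====
def Claim_equal_prioritize_next_skills_py : Prop := ∀ (current_skills : List String) (complementary : List String) (career_recs : List (String × List String)) (trending : List String), Dom_prioritize_next_skills_py current_skills complementary career_recs trending → Spec_prioritize_next_skills_py current_skills complementary career_recs trending (prioritize_next_skills_py current_skills complementary career_recs trending)

-- ===== LEMMAS AND PROOFS =====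

-- A's per-phase loop step, with the dedup rescan made a flag.
def pnsStepA (cl : List String) (dedup : Bool) (pri rea cat : String)
    (acc : List (List (String × String))) (skill : String) : List (List (String × String)) :=
  if !(cl.contains (PySem.Str.lower skill)) && (!dedup || !((acc.map (fun s => (PySem.Dict.mk s).getD "skill" "")).contains skill)) then
    acc ++ [[("skill", skill), ("priority", pri), ("reason", rea), ("category", cat)]]
  else acc

theorem pns_foldl_ext {α : Type} {β : Type} (f g : α → β → α) (h : ∀ a x, f a x = g a x) :
    ∀ (l : List β) (i j : α), i = j → l.foldl f i = l.foldl g j := by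
  intro l
  induction l with
  | nil => intro i j e; simpa using e
  | cons x xs ih => intro i j e; simp only [List.foldl_cons]; exact ih _ _ (by rw [e, h])

def pnsSkills (acc : List (List (String × String))) : List String :=
  acc.map (fun s => (PySem.Dict.mk s).getD "skill" "")

theorem pnsSkills_tag (l : List String) (pri rea cat : String) :
    pnsSkills (pnsTag l pri rea cat) = l := by
  induction l with
  | nil => rfl
  | cons s rest ih =>
    simp only [pnsTag, pnsSkills, List.map_cons] at *
    rw [ih]
    simp [PySem.Dict.getD_eq_get?_getD, PySem.Dict.get?_mk_cons]

theorem pnsSkills_append (a b : List (List (String × String))) :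
    pnsSkills (a ++ b) = pnsSkills a ++ pnsSkills b := by
  simp [pnsSkills]

-- Phases without dedup: A's foldl = append of the tagged filter.
theorem pns_nodedup (cl : List String) (pri rea cat : String) :
    ∀ (src : List String) (acc : List (List (String × String))),
      src.foldl (pnsStepA cl false pri rea cat) acc
        = acc ++ pnsTag (src.filter (fun s => !(cl.contains (PySem.Str.lower s)))) pri rea cat := by
  intro src
  induction src with
  | nil => intro acc; simp [pnsTag]
  | cons s rest ih =>
    intro acc
    simp only [List.foldl_cons, List.filter_cons]
    by_cases hc : PySem.Str.lower s ∈ cl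
    · have h1 : pnsStepA cl false pri rea cat acc s = acc := by simp [pnsStepA, hc]
      have h2 : (!cl.contains (PySem.Str.lower s)) = false := by simp [hc]
      rw [h1, h2, if_neg Bool.false_ne_true]
      exact ih acc
    · have h1 : pnsStepA cl false pri rea cat acc s
          = acc ++ [[("skill", s), ("priority", pri), ("reason", rea), ("category", cat)]] := by
        simp [pnsStepA, hc]
      have h2 : (!cl.contains (PySem.Str.lower s)) = true := by simp [hc]
      rw [h1, h2, if_pos rfl, ih]
      simp [pnsTag]

-- Phases with dedup: A's foldl = append of the tagged first-occurrence selection,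
-- provided seen's membership matches the skills already in acc.
theorem pns_dedup (cl : List String) (clS : PySem.Set String)
    (hcl : ∀ x, PySem.Set.contains clS x = cl.contains x) (pri rea cat : String) :
    ∀ (src : List String) (acc : List (List (String × String))) (seen : PySem.Set String),
      (∀ x, PySem.Set.contains seen x = (pnsSkills acc).contains x) →
      src.foldl (pnsStepA cl true pri rea cat) acc
        = acc ++ pnsTag (pnsFirstNew src clS seen) pri rea cat := by
  intro src
  induction src with
  | nil => intro acc seen _; simp [pnsFirstNew, pnsTag]
  | cons s rest ih =>
    intro acc seen hinv
    simp only [List.foldl_cons, pnsFirstNew]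
    by_cases hc : PySem.Str.lower s ∈ cl
    · have hcb : cl.contains (PySem.Str.lower s) = true := by simpa using hc
      have hA : pnsStepA cl true pri rea cat acc s = acc := by simp [pnsStepA, hc]
      have hcS : (!(PySem.Set.contains clS (PySem.Str.lower s)) && !(PySem.Set.contains seen s)) = false := by
        rw [hcl, hcb]; simp
      rw [hA, hcS, if_neg Bool.false_ne_true]
      exact ih acc seen hinv
    · have hcb : cl.contains (PySem.Str.lower s) = false := by simpa using hc
      by_cases hs : s ∈ pnsSkills acc
      · have hsb : (pnsSkills acc).contains s = true := by simpa using hs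
        have hA : pnsStepA cl true pri rea cat acc s = acc := by
          simp only [pnsStepA, pnsSkills] at *
          rw [if_neg]
          rw [hcb, hsb]; simp
        have hcS : (!(PySem.Set.contains clS (PySem.Str.lower s)) && !(PySem.Set.contains seen s)) = false := by
          rw [hcl, hcb, hinv, hsb]; simp
        rw [hA, hcS, if_neg Bool.false_ne_true]
        exact ih acc seen hinv
      · have hsb : (pnsSkills acc).contains s = false := by simpa using hs
        have hA : pnsStepA cl true pri rea cat acc s
            = acc ++ [[("skill", s), ("priority", pri), ("reason", rea), ("category", cat)]] := by
          simp only [pnsStepA, pnsSkills] at *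
          rw [if_pos]
          rw [hcb, hsb]; simp
        have hcS : (!(PySem.Set.contains clS (PySem.Str.lower s)) && !(PySem.Set.contains seen s)) = true := by
          rw [hcl, hcb, hinv, hsb]; simp
        rw [hA, hcS, if_pos rfl]
        have hinv' : ∀ x, PySem.Set.contains (PySem.Set.add seen s) x
            = (pnsSkills (acc ++ [[("skill", s), ("priority", pri), ("reason", rea), ("category", cat)]])).contains x := by
          intro x
          have hsk : pnsSkills (acc ++ [[("skill", s), ("priority", pri), ("reason", rea), ("category", cat)]])
              = pnsSkills acc ++ [s] := by
            simp [pnsSkills, PySem.Dict.getD_eq_get?_getD, PySem.Dict.get?_mk_cons]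
          rw [hsk, Bool.eq_iff_iff, PySem.Set.contains_iff, PySem.Set.mem_add]
          have := hinv x
          rw [Bool.eq_iff_iff, PySem.Set.contains_iff] at this
          simp [this]
        rw [ih _ _ hinv']
        simp [pnsTag]

theorem pns_ofList_contains (l : List String) (x : String) :
    PySem.Set.contains (PySem.Set.ofList l) x = l.contains x := by
  rw [Bool.eq_iff_iff, PySem.Set.contains_iff, PySem.Set.mem_ofList]
  simp

theorem prioritize_next_skills_py_spec : Claim_equal_prioritize_next_skills_py := by
  intro cs comp cr tr _hdom
  unfold Spec_prioritize_next_skills_py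
  have hcl : ∀ x, PySem.Set.contains (PySem.Set.ofList (cs.map PySem.Str.lower)) x
      = (cs.map PySem.Str.lower).contains x := pns_ofList_contains _
  -- reshape A's four literal foldls into pnsStepA form
  have hA : prioritize_next_skills_py cs comp cr tr
      = List.foldl (pnsStepA (cs.map PySem.Str.lower) true "medium" "Complements your current skills" "complementary")
          (List.foldl (pnsStepA (cs.map PySem.Str.lower) true "medium" "High market demand" "market_trend")
            (List.foldl (pnsStepA (cs.map PySem.Str.lower) false "high" "Needed for career advancement" "career_growth")
              (List.foldl (pnsStepA (cs.map PySem.Str.lower) false "critical" "Required for current role" "career_essential")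
                [] ((PySem.Dict.mk cr).getD "missing_core_skills" []))
              (PySem.List.slice ((PySem.Dict.mk cr).getD "missing_recommended_skills" []) none (some 5)))
            (PySem.List.slice tr none (some 5)))
          (PySem.List.slice comp none (some 5)) := by
    unfold prioritize_next_skills_py
    dsimp only
    refine pns_foldl_ext _ _ (fun a x => ?_) _ _ _
      (pns_foldl_ext _ _ (fun a x => ?_) _ _ _
        (pns_foldl_ext _ _ (fun a x => ?_) _ _ _
          (pns_foldl_ext _ _ (fun a x => ?_) _ _ _ rfl))) <;>
      simp [pnsStepA]
  have hfiltereq : ∀ (l : List String),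
      l.filter (fun s => !(PySem.Set.contains (PySem.Set.ofList (cs.map PySem.Str.lower)) (PySem.Str.lower s)))
        = l.filter (fun s => !((cs.map PySem.Str.lower).contains (PySem.Str.lower s))) := by
    intro l; apply List.filter_congr; intro x _; rw [hcl]
  have halt : prioritize_next_skills_py_alt cs comp cr tr
      = pnsTag (((PySem.Dict.mk cr).getD "missing_core_skills" []).filter
            (fun s => !((cs.map PySem.Str.lower).contains (PySem.Str.lower s)))) "critical" "Required for current role" "career_essential"
        ++ pnsTag ((PySem.List.slice ((PySem.Dict.mk cr).getD "missing_recommended_skills" []) none (some 5)).filter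
            (fun s => !((cs.map PySem.Str.lower).contains (PySem.Str.lower s)))) "high" "Needed for career advancement" "career_growth"
        ++ pnsTag (pnsFirstNew (PySem.List.slice tr none (some 5)) (PySem.Set.ofList (cs.map PySem.Str.lower))
            (PySem.Set.ofList ((((PySem.Dict.mk cr).getD "missing_core_skills" []).filter
                (fun s => !((cs.map PySem.Str.lower).contains (PySem.Str.lower s))))
              ++ ((PySem.List.slice ((PySem.Dict.mk cr).getD "missing_recommended_skills" []) none (some 5)).filter
                (fun s => !((cs.map PySem.Str.lower).contains (PySem.Str.lower s))))))) "medium" "High market demand" "market_trend"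
        ++ pnsTag (pnsFirstNew (PySem.List.slice comp none (some 5)) (PySem.Set.ofList (cs.map PySem.Str.lower))
            (PySem.Set.ofList ((((PySem.Dict.mk cr).getD "missing_core_skills" []).filter
                (fun s => !((cs.map PySem.Str.lower).contains (PySem.Str.lower s))))
              ++ ((PySem.List.slice ((PySem.Dict.mk cr).getD "missing_recommended_skills" []) none (some 5)).filter
                (fun s => !((cs.map PySem.Str.lower).contains (PySem.Str.lower s))))
              ++ pnsFirstNew (PySem.List.slice tr none (some 5)) (PySem.Set.ofList (cs.map PySem.Str.lower))
                  (PySem.Set.ofList ((((PySem.Dict.mk cr).getD "missing_core_skills" []).filter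
                      (fun s => !((cs.map PySem.Str.lower).contains (PySem.Str.lower s))))
                    ++ ((PySem.List.slice ((PySem.Dict.mk cr).getD "missing_recommended_skills" []) none (some 5)).filter
                      (fun s => !((cs.map PySem.Str.lower).contains (PySem.Str.lower s))))))))) "medium" "Complements your current skills" "complementary" := by
    unfold prioritize_next_skills_py_alt
    dsimp only
    rw [hfiltereq, hfiltereq]
  rw [hA, halt]
  set core := (((PySem.Dict.mk cr).getD "missing_core_skills" []).filter
      (fun s => !((cs.map PySem.Str.lower).contains (PySem.Str.lower s)))) with hcore
  set rec_ := ((PySem.List.slice ((PySem.Dict.mk cr).getD "missing_recommended_skills" []) none (some 5)).filter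
      (fun s => !((cs.map PySem.Str.lower).contains (PySem.Str.lower s)))) with hrec
  set trend := pnsFirstNew (PySem.List.slice tr none (some 5)) (PySem.Set.ofList (cs.map PySem.Str.lower))
      (PySem.Set.ofList (core ++ rec_)) with htrend
  -- phases 1 and 2
  rw [pns_nodedup (cs.map PySem.Str.lower) "critical" "Required for current role" "career_essential"
      ((PySem.Dict.mk cr).getD "missing_core_skills" []) []]
  rw [pns_nodedup (cs.map PySem.Str.lower) "high" "Needed for career advancement" "career_growth"
      (PySem.List.slice ((PySem.Dict.mk cr).getD "missing_recommended_skills" []) none (some 5))]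
  rw [List.nil_append, ← hcore, ← hrec]
  -- phase 3
  rw [pns_dedup (cs.map PySem.Str.lower) (PySem.Set.ofList (cs.map PySem.Str.lower)) hcl
      "medium" "High market demand" "market_trend" (PySem.List.slice tr none (some 5)) _
      (PySem.Set.ofList (core ++ rec_))
      (by intro x
          rw [pns_ofList_contains, pnsSkills_append, pnsSkills_tag, pnsSkills_tag])]
  rw [← htrend]
  -- phase 4
  rw [pns_dedup (cs.map PySem.Str.lower) (PySem.Set.ofList (cs.map PySem.Str.lower)) hcl
      "medium" "Complements your current skills" "complementary" (PySem.List.slice comp none (some 5)) _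
      (PySem.Set.ofList (core ++ rec_ ++ trend))
      (by intro x
          rw [pns_ofList_contains, pnsSkills_append, pnsSkills_append, pnsSkills_tag, pnsSkills_tag, pnsSkills_tag])]
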